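-- pv_equiv track=rewrite | github.com/Rishabh0131/Leetcode_Questions_Code | stack/Leetcode_2000.py | reversePrefixTwoPointer
-- ===== SOURCE A (Python) =====
-- def reversePrefixTwoPointer(word: str, ch: str) -> str:
--     res = list(word)
--     left = 0
--
--     for right, char in enumerate(res):
--         if char == ch:
--             while left < right:
--                 res[left], res[right] = res[right], res[left]
--                 left += 1
--                 right -= 1
--             break
--
--     return "".join(res)
-- ===== SOURCE B (Python) =====
-- def reversePrefixTwoPointer(word: str, ch: str) -> str:
--     i = next((j for j, c in enumerate(word) if c == ch), -1)
--     if i == -1: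
--         return word
--     return word[:i + 1][::-1] + word[i + 1:]
-- ===== Notes on version B (the rewrite author's own statement) =====
-- stated objective: idiomatic
-- what changed: Replaces the in-place two-pointer swap loop over a char list with finding the first matching index and reversing the prefix by slicing.
import Mathlib
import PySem

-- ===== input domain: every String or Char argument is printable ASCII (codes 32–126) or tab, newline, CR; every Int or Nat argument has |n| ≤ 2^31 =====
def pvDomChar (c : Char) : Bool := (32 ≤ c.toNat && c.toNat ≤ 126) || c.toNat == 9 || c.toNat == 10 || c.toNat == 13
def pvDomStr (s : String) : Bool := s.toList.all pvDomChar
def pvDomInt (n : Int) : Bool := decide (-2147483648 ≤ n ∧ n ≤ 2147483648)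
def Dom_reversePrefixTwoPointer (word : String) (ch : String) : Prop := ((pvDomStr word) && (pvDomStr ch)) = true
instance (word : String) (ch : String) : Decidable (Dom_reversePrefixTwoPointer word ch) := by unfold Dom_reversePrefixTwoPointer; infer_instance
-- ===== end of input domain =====

-- B replaces A's in-place two-pointer swap loop with first-match index + slice reversal (idiomatic; same cost).


-- ===== PORT A =====
-- the inner `while left < right` swap loop (indices are always in range, so getD is exact)
def pvSwapA (res : List Char) (l r : Nat) : List Char :=
  if l < r then
    pvSwapA ((res.set l (res.getD r ' ')).set r (res.getD l ' ')) (l + 1) (r - 1)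
  else res
termination_by r - l

-- the `for right, char in enumerate(res)` loop with its `break`
def pvLoopA (res : List Char) (ch : String) (pairs : List (Nat × Char)) (left : Nat) : List Char :=
  match pairs with
  | [] => res
  | (right, c) :: rest =>
    if String.ofList [c] == ch then pvSwapA res left right
    else pvLoopA res ch rest left

-- Nat-indexed enumerate (Python's indices here are always ≥ 0)
def pvEnumA (xs : List Char) (s : Nat) : List (Nat × Char) :=
  match xs with
  | [] => []
  | x :: rest => (s, x) :: pvEnumA rest (s + 1)

def reversePrefixTwoPointer (word : String) (ch : String) : String :=
  String.ofList (pvLoopA word.toList ch (pvEnumA word.toList 0) 0)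

-- ===== PORT B =====
def reversePrefixTwoPointer_alt (word : String) (ch : String) : String :=
  match (pvEnumA word.toList 0).find? (fun p => String.ofList [p.2] == ch) with
  | none => word
  | some (i, _) =>
    String.ofList ((word.toList.take (i + 1)).reverse ++ word.toList.drop (i + 1))

-- ===== PRECONDITION & SPEC =====
def Spec_reversePrefixTwoPointer (word : String) (ch : String) (out : String) : Prop := out = reversePrefixTwoPointer_alt word ch
instance (word : String) (ch : String) (out : String) : Decidable (Spec_reversePrefixTwoPointer word ch out) := by unfold Spec_reversePrefixTwoPointer; infer_instance

-- ===== CLAIM (what is proved, stated in full; the proofs are below) =====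
def Claim_equal_reversePrefixTwoPointer : Prop := ∀ (word : String) (ch : String), Dom_reversePrefixTwoPointer word ch → Spec_reversePrefixTwoPointer word ch (reversePrefixTwoPointer word ch)

-- ===== LEMMAS AND PROOFS =====

theorem pvSwapA_length (res : List Char) (l r : Nat) : (pvSwapA res l r).length = res.length := by
  unfold pvSwapA
  split
  · rw [pvSwapA_length]; simp
  · rfl
termination_by r - l

theorem pvSwapA_getElem (res : List Char) (l r : Nat) (hr : r < res.length)
    (j : Nat) (hj : j < res.length) :
    (pvSwapA res l r)[j]'(by rw [pvSwapA_length]; exact hj) =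
      if h : l ≤ j ∧ j ≤ r then res[l + r - j]'(by omega) else res[j] := by
  unfold pvSwapA
  split
  · rename_i hlr
    have hl : l < res.length := by omega
    rw [pvSwapA_getElem _ _ _ (by simpa using (by omega : r - 1 < res.length)) j (by simpa using hj)]
    simp only [List.getElem_set, List.getD_eq_getElem?_getD, List.getElem?_eq_getElem hr,
      List.getElem?_eq_getElem hl, Option.getD_some]
    split_ifs <;> first | rfl | omega | (congr 1; omega)
  · rename_i hlr
    by_cases h : l ≤ j ∧ j ≤ r
    · rw [dif_pos h]  -- l = j = r here
      congr 1; omega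
    · rw [dif_neg h]
termination_by r - l

theorem pvSwapA_prefix (res : List Char) (i : Nat) (hi : i < res.length) :
    pvSwapA res 0 i = (res.take (i + 1)).reverse ++ res.drop (i + 1) := by
  apply List.ext_getElem
  · rw [pvSwapA_length]; simp; omega
  · intro j hj1 hj2
    rw [pvSwapA_length] at hj1
    rw [pvSwapA_getElem res 0 i hi j hj1]
    rw [List.getElem_append]
    simp only [List.length_reverse, List.length_take, List.getElem_reverse,
      List.getElem_take, List.getElem_drop]
    have hmin : min (i + 1) res.length = i + 1 := by omega
    simp only [hmin]
    by_cases h : j ≤ i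
    · rw [dif_pos ⟨Nat.zero_le j, h⟩, dif_pos (by omega)]
      congr 1; omega
    · rw [dif_neg (by omega), dif_neg (by omega)]
      congr 1; omega

theorem pvLoopA_eq (res : List Char) (ch : String) (pairs : List (Nat × Char))
    (hb : ∀ p ∈ pairs, p.1 < res.length) :
    pvLoopA res ch pairs 0 =
      match pairs.find? (fun p => String.ofList [p.2] == ch) with
      | none => res
      | some (i, _) => (res.take (i + 1)).reverse ++ res.drop (i + 1) := by
  induction pairs with
  | nil => rfl
  | cons p rest ih =>
    obtain ⟨r, c⟩ := p
    rw [pvLoopA, List.find?_cons]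
    by_cases hp : (String.ofList [c] == ch) = true
    · simp only [hp, if_pos]
      exact pvSwapA_prefix res r (hb (r, c) (by simp))
    · simp only [Bool.not_eq_true] at hp
      simp only [hp, Bool.false_eq_true, if_false]
      exact ih (fun p hp2 => hb p (by simp [hp2]))

theorem pvEnumA_fst_lt (xs : List Char) (s : Nat) (p : Nat × Char) (hp : p ∈ pvEnumA xs s) :
    p.1 < s + xs.length := by
  induction xs generalizing s with
  | nil => simp [pvEnumA] at hp
  | cons x rest ih =>
    rw [pvEnumA] at hp
    rcases List.mem_cons.mp hp with h | h
    · subst h; simp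
    · have := ih (s + 1) h
      simp only [List.length_cons]
      omega

-- ===== VERDICT (by name: the statement is the Claim_ definition above) =====
theorem reversePrefixTwoPointer_spec : Claim_equal_reversePrefixTwoPointer := by
  intro word ch _
  unfold Spec_reversePrefixTwoPointer reversePrefixTwoPointer reversePrefixTwoPointer_alt
  rw [pvLoopA_eq word.toList ch (pvEnumA word.toList 0)
    (fun p hp => by simpa using pvEnumA_fst_lt word.toList 0 p hp)]
  cases hf : (pvEnumA word.toList 0).find? (fun p => String.ofList [p.2] == ch) with
  | none => exact String.ofList_toList
  | some p => obtain ⟨i, c⟩ := p; rfl
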